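-- pv_equiv track=rewrite | github.com/BioRRW/DRAM2 | dram2/distill/summarize_genomes.py | first_open_paren_is_all
-- ===== SOURCE A (Python) =====
-- def first_open_paren_is_all(str_):
--     """Go through string and return true"""
--     curr_level = 1
--     for char in str_[1:-1]:
--         if char == ")":
--             curr_level -= 1
--         elif char == "(":
--             curr_level += 1
--         if curr_level == 0:
--             return False
--     return True
-- ===== SOURCE B (Python) =====
-- def first_open_paren_is_all(str_):
--     """Go through string and return true"""
--     s = "".join(c for c in str_[1:-1] if c in "()")
--     while "()" in s:
--         s = s.replace("()", "", 1)
--     return ")" not in s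
-- ===== Notes on version B (the rewrite author's own statement) =====
-- stated objective: alternative
-- what changed: Replaces A's running-level counter with pair-cancellation: keep only the parens of the interior, repeatedly delete the first adjacent open-close pair until none remains, and answer whether any close paren survives.
import Mathlib
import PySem

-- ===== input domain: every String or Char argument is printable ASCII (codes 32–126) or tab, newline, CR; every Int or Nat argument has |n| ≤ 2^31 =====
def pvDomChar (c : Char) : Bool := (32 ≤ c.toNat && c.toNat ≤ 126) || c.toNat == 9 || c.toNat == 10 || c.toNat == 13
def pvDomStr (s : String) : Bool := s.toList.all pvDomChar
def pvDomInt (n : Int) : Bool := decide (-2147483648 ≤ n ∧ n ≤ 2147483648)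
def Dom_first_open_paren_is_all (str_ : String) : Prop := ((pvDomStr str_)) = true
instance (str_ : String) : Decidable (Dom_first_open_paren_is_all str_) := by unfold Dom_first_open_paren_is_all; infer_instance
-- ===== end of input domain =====

-- B answers by pair-cancellation (keep only parens, repeatedly delete the first adjacent
-- open-close pair, test whether a close paren survives) instead of A's running-counter loop.


-- ===== PORT A =====
-- A's loop over str_[1:-1] with counter curr_level, early return False when it hits 0
def pvA_loop : List Char → Int → Bool
  | [], _ => true
  | ch :: rest, curr =>
    let curr' := if ch = ')' then curr - 1 else if ch = '(' then curr + 1 else curr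
    if curr' = 0 then false else pvA_loop rest curr'

def first_open_paren_is_all (str_ : String) : Bool :=
  pvA_loop (PySem.List.slice str_.toList (some 1) (some (-1))) 1

-- ===== PORT B =====
def pvIsParen (c : Char) : Bool := c == '(' || c == ')'

-- s.replace(pair, empty, 1): remove the first occurrence of an adjacent open-close pair; none when absent
def pvRmFirst : List Char → Option (List Char)
  | '(' :: ')' :: t => some t
  | c :: t => (pvRmFirst t).map (c :: ·)
  | [] => none

-- unfolding equation for the non-matching cons case (used by the termination lemma and below)
lemma pvRmFirst_none_cons {c : Char} {t : List Char}
    (hnp : ∀ t', c = '(' → t = ')' :: t' → False) :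
    pvRmFirst (c :: t) = (pvRmFirst t).map (c :: ·) := by
  rw [pvRmFirst.eq_def]
  split
  · rename_i heq
    injection heq with h1 h2
    exact absurd (hnp _ h1 h2) (fun h => h)
  · rename_i heq
    injection heq with h1 h2
    rw [h1, h2]
  · rename_i heq; exact absurd heq (by simp)

-- termination measure of B's while loop (cited by pvReduce's decreasing_by)
lemma pvRmFirst_length : ∀ {s t : List Char}, pvRmFirst s = some t → t.length < s.length := by
  intro s
  induction s using pvRmFirst.induct with
  | case1 t => intro t' h; simp only [pvRmFirst, Option.some_inj] at h; subst h; simp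
  | case2 c t hnp ih =>
    intro t' h
    rw [pvRmFirst_none_cons hnp] at h
    simp only [Option.map_eq_some_iff] at h
    obtain ⟨u, hu, rfl⟩ := h
    have := ih hu
    simp; omega
  | case3 => intro t h; simp [pvRmFirst] at h

-- the while loop: remove first pair until none remains
def pvReduce (s : List Char) : List Char :=
  match h : pvRmFirst s with
  | some t => pvReduce t
  | none => s
termination_by s.length
decreasing_by exact pvRmFirst_length h

def first_open_paren_is_all_alt (str_ : String) : Bool :=
  let s := (PySem.List.slice str_.toList (some 1) (some (-1))).filter pvIsParen
  !((pvReduce s).contains ')')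

-- ===== PRECONDITION & SPEC =====
def Spec_first_open_paren_is_all (str_ : String) (out : Bool) : Prop := out = first_open_paren_is_all_alt str_
instance (str_ : String) (out : Bool) : Decidable (Spec_first_open_paren_is_all str_ out) := by unfold Spec_first_open_paren_is_all; infer_instance

-- ===== CLAIM (what is proved, stated in full; the proofs are below) =====
def Claim_equal_first_open_paren_is_all : Prop := ∀ (str_ : String), Dom_first_open_paren_is_all str_ → Spec_first_open_paren_is_all str_ (first_open_paren_is_all str_)

-- ===== LEMMAS AND PROOFS =====

-- step lemmas for A's loop on a single character
lemma pvA_close (rest : List Char) (c : Int) :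
    pvA_loop (')' :: rest) c = if c - 1 = 0 then false else pvA_loop rest (c - 1) := by
  simp [pvA_loop]
lemma pvA_open (rest : List Char) (c : Int) :
    pvA_loop ('(' :: rest) c = if c + 1 = 0 then false else pvA_loop rest (c + 1) := by
  simp [pvA_loop]
lemma pvA_other (ch : Char) (rest : List Char) (c : Int) (h1 : ch ≠ ')') (h2 : ch ≠ '(') :
    pvA_loop (ch :: rest) c = if c = 0 then false else pvA_loop rest c := by
  simp [pvA_loop, h1, h2]

-- non-paren characters do not affect A's loop (its level is unchanged on them)
lemma pvA_filter : ∀ (cs : List Char) (c : Int), c ≠ 0 →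
    pvA_loop cs c = pvA_loop (cs.filter pvIsParen) c := by
  intro cs
  induction cs with
  | nil => intro c _; rfl
  | cons ch rest ih =>
    intro c hc
    by_cases h1 : ch = ')'
    · subst h1
      have : pvIsParen ')' = true := by decide
      rw [List.filter_cons, if_pos this, pvA_close, pvA_close]
      split
      · rfl
      · exact ih _ (by assumption)
    · by_cases h2 : ch = '('
      · subst h2
        have : pvIsParen '(' = true := by decide
        rw [List.filter_cons, if_pos this, pvA_open, pvA_open]
        split
        · rfl
        · exact ih _ (by assumption)
      · have hp : pvIsParen ch = false := by simp [pvIsParen, h1, h2]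
        rw [List.filter_cons, hp, pvA_other ch rest c h1 h2, if_neg hc]
        simp only [Bool.false_eq_true, if_false]
        exact ih c hc

-- deleting an adjacent open-close pair does not change A's verdict from a level ≥ 1
lemma pvA_insert : ∀ (u v : List Char) (c : Int), 1 ≤ c →
    pvA_loop (u ++ '(' :: ')' :: v) c = pvA_loop (u ++ v) c := by
  intro u
  induction u with
  | nil =>
    intro v c hc
    simp only [List.nil_append]
    rw [pvA_open, if_neg (by omega : ¬ c + 1 = 0), pvA_close,
      if_neg (by omega : ¬ c + 1 - 1 = 0)]
    congr 1
    omega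
  | cons ch rest ih =>
    intro v c hc
    by_cases h1 : ch = ')'
    · subst h1
      rw [List.cons_append, pvA_close, List.cons_append, pvA_close]
      split
      · rfl
      · exact ih v _ (by omega)
    · by_cases h2 : ch = '('
      · subst h2
        rw [List.cons_append, pvA_open, List.cons_append, pvA_open]
        split
        · rfl
        · exact ih v _ (by omega)
      · rw [List.cons_append, pvA_other ch _ c h1 h2, List.cons_append,
          pvA_other ch _ c h1 h2]
        simp only [if_neg (show ¬ c = 0 by omega)]
        exact ih v c hc

-- a successful removal step decomposes the string around its first removed pair
lemma pvRmFirst_decomp : ∀ {s t : List Char}, pvRmFirst s = some t →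
    ∃ u v, s = u ++ '(' :: ')' :: v ∧ t = u ++ v := by
  intro s
  induction s using pvRmFirst.induct with
  | case1 t => intro t' h; simp only [pvRmFirst, Option.some_inj] at h; subst h; exact ⟨[], t, rfl, rfl⟩
  | case2 c t hnp ih =>
    intro t' h
    rw [pvRmFirst_none_cons hnp] at h
    simp only [Option.map_eq_some_iff] at h
    obtain ⟨u', hu, rfl⟩ := h
    obtain ⟨u, v, rfl, rfl⟩ := ih hu
    exact ⟨c :: u, v, rfl, rfl⟩
  | case3 => intro t h; simp [pvRmFirst] at h

-- the fixpoint of removal does not change A's verdict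
lemma pvA_reduce : ∀ (s : List Char), pvA_loop (pvReduce s) 1 = pvA_loop s 1 := by
  intro s
  induction s using pvReduce.induct with
  | case1 s t h ih =>
    rw [pvReduce, h, ih]
    obtain ⟨u, v, rfl, rfl⟩ := pvRmFirst_decomp h
    exact (pvA_insert u v 1 le_rfl).symm
  | case2 s h => rw [pvReduce, h]

lemma pvReduce_none : ∀ (s : List Char), pvRmFirst (pvReduce s) = none := by
  intro s
  induction s using pvReduce.induct with
  | case1 s t h ih => rw [pvReduce, h]; exact ih
  | case2 s h => rw [pvReduce, h]; exact h

lemma pvReduce_all : ∀ (s : List Char), s.all pvIsParen → (pvReduce s).all pvIsParen := by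
  intro s
  induction s using pvReduce.induct with
  | case1 s t h ih =>
    intro hall
    rw [pvReduce, h]
    apply ih
    obtain ⟨u, v, rfl, rfl⟩ := pvRmFirst_decomp h
    simp only [List.all_append, List.all_cons, Bool.and_eq_true] at hall ⊢
    exact ⟨hall.1, hall.2.2.2⟩
  | case2 s h => intro hall; rw [pvReduce, h]; exact hall

-- an irreducible all-paren string is )^a (^b
lemma pvShape : ∀ (s : List Char), pvRmFirst s = none → s.all pvIsParen = true →
    ∃ a b, s = List.replicate a ')' ++ List.replicate b '(' := by
  intro s
  induction s with
  | nil => intro _ _; exact ⟨0, 0, rfl⟩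
  | cons ch rest ih =>
    intro hn hall
    simp only [List.all_cons, Bool.and_eq_true] at hall
    have hp := hall.1
    by_cases hcl : ch = ')'
    · subst hcl
      have hn' : pvRmFirst rest = none := by
        rw [pvRmFirst_none_cons (by intro t' h _; exact absurd h (by decide))] at hn
        simpa using hn
      obtain ⟨a, b, rfl⟩ := ih hn' hall.2
      exact ⟨a + 1, b, by simp [List.replicate_succ]⟩
    · have hop : ch = '(' := by
        simp [pvIsParen] at hp
        rcases hp with h | h
        · exact h
        · exact absurd h hcl
      subst hop
      have hrn : ∀ t, rest ≠ ')' :: t := by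
        intro t ht
        rw [ht, pvRmFirst.eq_def] at hn
        simp at hn
      have hn' : pvRmFirst rest = none := by
        rw [pvRmFirst_none_cons (by intro t' _ h; exact hrn t' h)] at hn
        simpa using hn
      obtain ⟨a, b, hab⟩ := ih hn' hall.2
      cases a with
      | zero => exact ⟨0, b + 1, by simp [hab, List.replicate_succ]⟩
      | succ a =>
        rw [List.replicate_succ, List.cons_append] at hab
        exact absurd hab (hrn _)

-- A never hits level 0 on a run of '(' starting from a positive level
lemma pvA_opens : ∀ (b : Nat) (c : Int), 1 ≤ c → pvA_loop (List.replicate b '(') c = true := by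
  intro b
  induction b with
  | zero => intro c _; rfl
  | succ b ih =>
    intro c hc
    rw [List.replicate_succ, pvA_open, if_neg (by omega : ¬ c + 1 = 0)]
    exact ih _ (by omega)

-- A on the level-1 counter equals B's pair-cancellation answer, for any char list
lemma pv_key (cs : List Char) :
    pvA_loop cs 1 = !((pvReduce (cs.filter pvIsParen)).contains ')') := by
  rw [pvA_filter cs 1 one_ne_zero, ← pvA_reduce (cs.filter pvIsParen)]
  have hall : (pvReduce (cs.filter pvIsParen)).all pvIsParen :=
    pvReduce_all _ (by simp [List.all_filter])
  obtain ⟨a, b, hab⟩ := pvShape _ (pvReduce_none (cs.filter pvIsParen)) hall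
  rw [hab]
  cases a with
  | zero =>
    simp only [List.replicate_zero, List.nil_append]
    rw [pvA_opens b 1 le_rfl]
    simp [List.contains_eq_mem, List.mem_replicate]
  | succ a =>
    rw [List.replicate_succ, List.cons_append, pvA_close]
    norm_num

-- ===== VERDICT (by name: the statement is the Claim_ definition above) =====
theorem first_open_paren_is_all_spec : Claim_equal_first_open_paren_is_all := by
  intro str_ _
  unfold Spec_first_open_paren_is_all first_open_paren_is_all first_open_paren_is_all_alt
  exact pv_key _
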